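-- pv_equiv track=rewrite | github.com/natenka/pyneng-examples | misc/cisco_config_diff/generate_cfg_diff.py | parse_cfg_section
-- ===== SOURCE A (Python) =====
-- from collections import OrderedDict as odict
--
-- def parse_cfg_section(section,level=1):
--     """
--     Function parse section of config.
--     In result only sections with changed children returned.
--     * section - List of commands.
--     * level - integer, current level of depth.
--     Returns dictionary with section header as a keys,
--     and a list of commands as a value.
--     """
--     current_section = ''
--     section_children = []
--     changed = False
--     section_dict = odict()
--
--     for command in section:
--         if not (level == 1 and len(command) < max(2, level)):
--             if command[level].isalpha():
--                 if current_section: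
--                     if changed:
--                         section_dict[current_section] = section_children
--                     section_children = []
--                     changed = False
--                 current_section = command
--             else:
--                section_children.append(command)
--         if command[0] in ['-','+']:
--             changed = True
--     if changed:
--         section_dict[current_section] = section_children
--     return section_dict
-- ===== SOURCE B (Python) =====
-- from collections import OrderedDict
--
--
-- def parse_cfg_section(section, level=1):
--     def skipped(cmd):
--         return level == 1 and len(cmd) < 2
--
--     def is_header(cmd):
--         return not skipped(cmd) and cmd[level].isalpha()
--
--     def split_at_header(cmds):
--         """(prefix with no headers, rest starting at the first header)."""
--         for i, c in enumerate(cmds):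
--             if is_header(c):
--                 return cmds[:i], cmds[i:]
--         return cmds, []
--
--     def children_of(cmds):
--         return [c for c in cmds if not skipped(c)]
--
--     def changed_in(cmds):
--         return any(c[0] in ('-', '+') for c in cmds)
--
--     result = OrderedDict()
--     lead, rest = split_at_header(section)
--     if not rest:
--         if changed_in(lead):
--             result[''] = children_of(lead)
--         return result
--     carry_children, carry_changed = children_of(lead), changed_in(lead)
--     while rest:
--         header, tail = rest[0], rest[1:]
--         body, rest = split_at_header(tail)
--         if carry_changed or header[0] in ('-', '+') or changed_in(body):
--             result[header] = carry_children + children_of(body)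
--         carry_children, carry_changed = [], False
--     return result
-- ===== Notes on version B (the rewrite author's own statement) =====
-- stated objective: alternative
-- what changed: B replaces A's single pass over mutable state (current_section/section_children/changed) by a two-phase decomposition: split the command list into header-delimited segments, then emit an OrderedDict entry per segment whose span contains a '+'/'-' command, with leading commands folded into the first segment.
import Mathlib
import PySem

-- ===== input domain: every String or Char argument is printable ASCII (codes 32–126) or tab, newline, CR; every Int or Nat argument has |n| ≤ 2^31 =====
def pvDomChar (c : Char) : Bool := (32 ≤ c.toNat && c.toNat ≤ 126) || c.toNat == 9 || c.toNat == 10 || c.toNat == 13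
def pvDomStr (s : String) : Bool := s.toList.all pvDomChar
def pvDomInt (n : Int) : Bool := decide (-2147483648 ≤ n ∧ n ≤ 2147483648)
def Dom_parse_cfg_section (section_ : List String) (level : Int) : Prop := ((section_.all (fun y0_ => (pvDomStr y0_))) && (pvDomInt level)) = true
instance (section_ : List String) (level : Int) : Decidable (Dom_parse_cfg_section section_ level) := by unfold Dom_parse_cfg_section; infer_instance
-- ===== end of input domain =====

-- B re-implements the same parse in two phases (split the command list into header-delimited
-- segments, then emit the changed ones) instead of A's single pass over mutable state;
-- objective: alternative decomposition, same asymptotic cost.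

-- ===== PORT A =====
-- shared primitives for the Python expressions both programs use verbatim:
-- 'level == 1 and len(command) < max(2, level)', 'command[level].isalpha()', "command[0] in ['-','+']"
def pvSkip (level : Int) (c : String) : Bool :=
  (level == 1) && decide (PySem.Str.len c < max 2 level)

def pvAlphaAt (level : Int) (c : String) : Bool :=
  match PySem.Str.pyGet? c level with          -- none = IndexError, excluded by Pre_
  | some ch => PySem.Chars.isalpha ch
  | none => false

def pvSign (c : String) : Bool :=
  match PySem.Str.pyGet? c 0 with              -- none = IndexError, excluded by Pre_
  | some ch => ch == '-' || ch == '+'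
  | none => false

-- one iteration of A's for-loop over state (current_section, section_children, changed, section_dict)
def pvStepA (level : Int) (st : String × List String × Bool × PySem.Dict String (List String))
    (command : String) : String × List String × Bool × PySem.Dict String (List String) :=
  let st' :=
    if !pvSkip level command then
      if pvAlphaAt level command then
        if st.1 ≠ "" then
          (command, ([] : List String), false, if st.2.2.1 then st.2.2.2.insert st.1 st.2.1 else st.2.2.2)
        else
          (command, st.2.1, st.2.2.1, st.2.2.2)
      else
        (st.1, st.2.1 ++ [command], st.2.2.1, st.2.2.2)
    else st
  (st'.1, st'.2.1, st'.2.2.1 || pvSign command, st'.2.2.2)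

-- A's trailing 'if changed: section_dict[current_section] = section_children'
def pvFlush (st : String × List String × Bool × PySem.Dict String (List String)) :
    PySem.Dict String (List String) :=
  if st.2.2.1 then st.2.2.2.insert st.1 st.2.1 else st.2.2.2

def parse_cfg_section (section_ : List String) (level : Int) : List (String × List String) :=
  (pvFlush (section_.foldl (pvStepA level)
    ("", ([] : List String), false, (PySem.Dict.empty : PySem.Dict String (List String))))).items

-- ===== PORT B =====
def pvIsHeader (level : Int) (c : String) : Bool := !pvSkip level c && pvAlphaAt level c

def pvSplitAtHeader (level : Int) : List String → List String × List String
  | [] => ([], [])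
  | c :: cs =>
    if pvIsHeader level c then ([], c :: cs)
    else
      let pr := pvSplitAtHeader level cs
      (c :: pr.1, pr.2)

-- needed by pvLoopB's termination proof
theorem pvSplitAtHeader_snd_length_le (level : Int) (cs : List String) :
    (pvSplitAtHeader level cs).2.length ≤ cs.length := by
  induction cs with
  | nil => simp [pvSplitAtHeader]
  | cons c cs ih =>
    simp only [pvSplitAtHeader]
    split
    · simp
    · simpa using Nat.le_succ_of_le ih

def pvChildrenOf (level : Int) (cmds : List String) : List String :=
  cmds.filter (fun c => !pvSkip level c)

def pvChangedIn (cmds : List String) : Bool := cmds.any pvSign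

def pvLoopB (level : Int) (result : PySem.Dict String (List String))
    (carryC : List String) (carryChg : Bool) :
    List String → PySem.Dict String (List String)
  | [] => result
  | header :: tail =>
    let pr := pvSplitAtHeader level tail
    let result' :=
      if carryChg || pvSign header || pvChangedIn pr.1 then
        result.insert header (carryC ++ pvChildrenOf level pr.1)
      else result
    pvLoopB level result' [] false pr.2
termination_by rest => rest.length
decreasing_by
  exact Nat.lt_succ_of_le (pvSplitAtHeader_snd_length_le level tail)

def parse_cfg_section_alt (section_ : List String) (level : Int) : List (String × List String) :=
  (let pr := pvSplitAtHeader level section_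
   if pr.2 = [] then
     if pvChangedIn pr.1 then
       (PySem.Dict.empty : PySem.Dict String (List String)).insert "" (pvChildrenOf level pr.1)
     else (PySem.Dict.empty : PySem.Dict String (List String))
   else
     pvLoopB level PySem.Dict.empty (pvChildrenOf level pr.1) (pvChangedIn pr.1) pr.2).items

-- ===== PRECONDITION & SPEC =====
-- Pre_ excludes exactly the inputs where the Python A raises IndexError: a command that is the
-- empty string (command[0]), or — when the length guard does not skip it — a command in which
-- index 'level' is out of range (command[level]).
def Pre_parse_cfg_section (section_ : List String) (level : Int) : Prop :=
  ∀ c ∈ section_, c ≠ "" ∧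
    (¬(level = 1 ∧ PySem.Str.len c < 2) → PySem.Raise.InRange c.toList.length level)

instance (section_ : List String) (level : Int) : Decidable (Pre_parse_cfg_section section_ level) := by
  unfold Pre_parse_cfg_section; infer_instance

def pvWitness_parse_cfg_section : List String × Int :=
  (["interface Fa0/1", "+ ip address 1.1.1.1 255.255.255.0", "interface Fa0/2", " duplex auto"], 1)

def Spec_parse_cfg_section (section_ : List String) (level : Int) (out : List (String × List String)) : Prop := out = parse_cfg_section_alt section_ level
instance (section_ : List String) (level : Int) (out : List (String × List String)) : Decidable (Spec_parse_cfg_section section_ level out) := by unfold Spec_parse_cfg_section; infer_instance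

-- ===== CLAIM (what is proved, stated in full; the proofs are below) =====
def Claim_equal_parse_cfg_section : Prop := ∀ (section_ : List String) (level : Int), Dom_parse_cfg_section section_ level → Pre_parse_cfg_section section_ level → Spec_parse_cfg_section section_ level (parse_cfg_section section_ level)

-- ===== LEMMAS AND PROOFS =====

theorem pvWitness_ok :
    Dom_parse_cfg_section pvWitness_parse_cfg_section.1 pvWitness_parse_cfg_section.2 ∧
    Pre_parse_cfg_section pvWitness_parse_cfg_section.1 pvWitness_parse_cfg_section.2 := by
  decide

theorem pvSplit_append (level : Int) (cs : List String) :
    (pvSplitAtHeader level cs).1 ++ (pvSplitAtHeader level cs).2 = cs := by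
  induction cs with
  | nil => simp [pvSplitAtHeader]
  | cons c cs ih =>
    simp only [pvSplitAtHeader]
    split
    · simp
    · simpa using ih

theorem pvSplit_fst_no_header (level : Int) (cs : List String) :
    ∀ c ∈ (pvSplitAtHeader level cs).1, pvIsHeader level c = false := by
  induction cs with
  | nil => simp [pvSplitAtHeader]
  | cons c cs ih =>
    simp only [pvSplitAtHeader]
    split
    · simp
    · next hc =>
      intro x hx
      rcases List.mem_cons.mp hx with rfl | hx
      · simpa using hc
      · exact ih x hx

theorem pvSplit_snd_head (level : Int) (cs : List String) (h : String) (t : List String)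
    (hs : (pvSplitAtHeader level cs).2 = h :: t) : pvIsHeader level h = true := by
  induction cs with
  | nil => simp [pvSplitAtHeader] at hs
  | cons c cs ih =>
    simp only [pvSplitAtHeader] at hs
    split at hs
    · next hc => cases hs; exact hc
    · exact ih hs

theorem pvHeader_ne_empty (level : Int) (c : String) (hc : pvIsHeader level c = true) : c ≠ "" := by
  rintro rfl
  simp only [pvIsHeader, pvAlphaAt, Bool.and_eq_true] at hc
  have : PySem.Str.pyGet? "" level = none := by
    simp only [PySem.Str.pyGet?_eq, PySem.Chars.pyGet?_eq_listPyGet?]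
    rw [PySem.List.pyGet?_eq_none_iff]
    intro hin
    rcases hin with ⟨h1, h2⟩
    simp at h1 h2
    omega
  rw [this] at hc
  simp at hc

theorem pvStepA_nonheader (level : Int) (cur : String) (ch : List String) (chg : Bool)
    (d : PySem.Dict String (List String)) (c : String) (hc : pvIsHeader level c = false) :
    pvStepA level (cur, ch, chg, d) c =
      (cur, ch ++ pvChildrenOf level [c], chg || pvSign c, d) := by
  simp only [pvIsHeader, Bool.and_eq_false_iff, Bool.not_eq_false'] at hc
  rcases hc with hc | hc
  · simp [pvStepA, pvChildrenOf, hc]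
  · by_cases hs : pvSkip level c <;> simp [pvStepA, pvChildrenOf, hc, hs]

theorem pvStepA_header (level : Int) (cur : String) (ch : List String) (chg : Bool)
    (d : PySem.Dict String (List String)) (c : String) (hc : pvIsHeader level c = true)
    (hcur : cur ≠ "") :
    pvStepA level (cur, ch, chg, d) c =
      (c, ([] : List String), pvSign c, if chg then d.insert cur ch else d) := by
  simp only [pvIsHeader, Bool.and_eq_true, Bool.not_eq_true'] at hc
  simp [pvStepA, hc.1, hc.2, hcur]

theorem pvStepA_header_start (level : Int) (ch : List String) (chg : Bool)
    (d : PySem.Dict String (List String)) (c : String) (hc : pvIsHeader level c = true) :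
    pvStepA level ("", ch, chg, d) c = (c, ch, chg || pvSign c, d) := by
  simp only [pvIsHeader, Bool.and_eq_true, Bool.not_eq_true'] at hc
  simp [pvStepA, hc.1, hc.2]

theorem pvFoldl_prefix (level : Int) (pre : List String)
    (hpre : ∀ c ∈ pre, pvIsHeader level c = false) :
    ∀ (cur : String) (ch : List String) (chg : Bool) (d : PySem.Dict String (List String)),
    pre.foldl (pvStepA level) (cur, ch, chg, d) =
      (cur, ch ++ pvChildrenOf level pre, chg || pvChangedIn pre, d) := by
  induction pre with
  | nil => intro cur ch chg d; simp [pvChildrenOf, pvChangedIn]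
  | cons c cs ih =>
    intro cur ch chg d
    have hc : pvIsHeader level c = false := hpre c (List.mem_cons_self ..)
    have hcs : ∀ x ∈ cs, pvIsHeader level x = false := fun x hx => hpre x (List.mem_cons_of_mem _ hx)
    simp only [List.foldl_cons, pvStepA_nonheader level cur ch chg d c hc, ih hcs]
    simp [pvChildrenOf, pvChangedIn, Bool.or_assoc]
    by_cases hs : pvSkip level c <;> simp [hs]

-- core invariant: from a state whose current_section is a real header, A's remaining loop plus
-- the final flush computes exactly B's segment loop
theorem pvMain (level : Int) : ∀ (n : Nat) (rest : List String), rest.length ≤ n →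
    ∀ (h : String) (C : List String) (G : Bool) (d : PySem.Dict String (List String)), h ≠ "" →
    pvFlush (rest.foldl (pvStepA level) (h, C, G, d)) =
      pvLoopB level
        (if G || pvChangedIn (pvSplitAtHeader level rest).1 then
           d.insert h (C ++ pvChildrenOf level (pvSplitAtHeader level rest).1)
         else d)
        [] false (pvSplitAtHeader level rest).2 := by
  intro n
  induction n with
  | zero =>
    intro rest hlen h C G d hne
    have : rest = [] := List.length_eq_zero_iff.mp (Nat.le_zero.mp hlen)
    subst this
    simp [pvSplitAtHeader, pvLoopB, pvFlush, pvChangedIn, pvChildrenOf]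
  | succ n ih =>
    intro rest hlen h C G d hne
    have hsplit := pvSplit_append level rest
    have hpre := pvSplit_fst_no_header level rest
    rcases hrest2 : (pvSplitAtHeader level rest).2 with _ | ⟨h2, tail2⟩
    · -- no further header: the fold is the prefix fold, flush closes the open segment
      rw [hrest2] at hsplit
      conv_lhs => rw [← hsplit]
      simp only [List.append_nil]
      rw [pvFoldl_prefix level _ hpre]
      simp [pvFlush, pvLoopB]
    · -- next header h2: A flushes there with the same condition, then both recurse
      have hh2 : pvIsHeader level h2 = true := pvSplit_snd_head level rest h2 tail2 hrest2
      have hh2ne : h2 ≠ "" := pvHeader_ne_empty level h2 hh2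
      rw [hrest2] at hsplit
      conv_lhs => rw [← hsplit]
      rw [List.foldl_append, pvFoldl_prefix level _ hpre, List.foldl_cons,
        pvStepA_header level h _ _ d h2 hh2 hne]
      have hlen2 : tail2.length ≤ n := by
        have := congrArg List.length hsplit
        simp at this
        omega
      rw [ih tail2 hlen2 h2 [] (pvSign h2) _ hh2ne]
      simp only [pvLoopB, Bool.false_or, List.nil_append]

theorem pvEquiv (section_ : List String) (level : Int) :
    parse_cfg_section section_ level = parse_cfg_section_alt section_ level := by
  unfold parse_cfg_section parse_cfg_section_alt
  have hsplit := pvSplit_append level section_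
  have hpre := pvSplit_fst_no_header level section_
  rcases hrest : (pvSplitAtHeader level section_).2 with _ | ⟨h1, tail⟩
  · rw [hrest] at hsplit
    conv_lhs => rw [← hsplit]
    simp only [List.append_nil]
    rw [pvFoldl_prefix level _ hpre]
    simp only [hrest]
    by_cases hchg : pvChangedIn (pvSplitAtHeader level section_).1 <;>
      simp [pvFlush, hchg]
  · have hh1 : pvIsHeader level h1 = true := pvSplit_snd_head level section_ h1 tail hrest
    have hh1ne : h1 ≠ "" := pvHeader_ne_empty level h1 hh1
    rw [hrest] at hsplit
    conv_lhs => rw [← hsplit]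
    rw [List.foldl_append, pvFoldl_prefix level _ hpre, List.foldl_cons,
      pvStepA_header_start level _ _ _ h1 hh1]
    rw [pvMain level tail.length tail (le_refl _) h1 _ _ _ hh1ne]
    simp only [hrest, List.nil_append, Bool.false_or]
    rw [if_neg (List.cons_ne_nil h1 tail)]
    simp only [pvLoopB]

-- ===== VERDICT (by name: the statement is the Claim_ definition above) =====
theorem parse_cfg_section_spec : Claim_equal_parse_cfg_section := by
  intro section_ level _ _
  unfold Spec_parse_cfg_section
  exact pvEquiv section_ level
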